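-- pv_equiv track=rewrite | github.com/osvaldohg/hacker_rank | interview_preparation_kit/python/strings/special_palindrome_again.py | sameCount
-- ===== SOURCE A (Python) =====
-- def sameCount(n,s):
--     subtotal=0
--     count=1
--     for i in range(1,n):
--         if s[i]==s[i-1]:
--             count+=1
--             subtotal+=count-1
--         else:
--             count=1
--     return subtotal
-- ===== SOURCE B (Python) =====
-- def sameCount(n, s):
--     t = s[:n] if n > 0 else ""
--     runs = []
--     for c in t:
--         if runs and runs[-1][0] == c:
--             runs[-1] = (runs[-1][0], runs[-1][1] + 1)
--         else:
--             runs.append((c, 1))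
--     return sum(L * (L - 1) // 2 for _, L in runs)
-- ===== Notes on version B (the rewrite author's own statement) =====
-- stated objective: alternative
-- what changed: B builds the list of maximal equal-character runs of s[:n] and sums the closed-form L*(L-1)//2 per run, instead of A's index-pair scan with an incremental 'subtotal += count-1' accumulator.
import Mathlib
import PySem

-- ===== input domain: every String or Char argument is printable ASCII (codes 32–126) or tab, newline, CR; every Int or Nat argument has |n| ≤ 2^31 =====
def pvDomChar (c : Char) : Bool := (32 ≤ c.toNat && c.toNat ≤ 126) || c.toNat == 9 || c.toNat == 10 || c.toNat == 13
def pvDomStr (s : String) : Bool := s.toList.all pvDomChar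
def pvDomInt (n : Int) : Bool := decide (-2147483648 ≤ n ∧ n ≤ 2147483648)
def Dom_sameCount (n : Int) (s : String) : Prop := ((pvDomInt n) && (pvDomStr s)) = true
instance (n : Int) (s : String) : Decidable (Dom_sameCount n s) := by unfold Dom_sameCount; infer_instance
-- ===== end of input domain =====

-- B counts equal-adjacent pairs per maximal run with the closed form L*(L-1)//2 instead of A's
-- incremental 'subtotal += count-1' accumulation; alternative decomposition, same cost.

-- ===== PORT A =====
def sameCount (n : Int) (s : String) : Int :=
  ((PySem.List.pyRange 1 n 1).foldl
    (fun (st : Int × Int) (i : Int) =>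
      if PySem.Str.pyGet? s i = PySem.Str.pyGet? s (i - 1) then
        (st.1 + ((st.2 + 1) - 1), st.2 + 1)
      else
        (st.1, 1))
    (0, 1)).1

-- ===== PORT B =====
def sameCount_alt (n : Int) (s : String) : Int :=
  let t := if n > 0 then PySem.Str.slice s none (some n) else ""
  let runs := t.toList.foldl
    (fun (runs : List (Char × Int)) (c : Char) =>
      match runs.getLast? with
      | some last => if last.1 = c then runs.dropLast ++ [(last.1, last.2 + 1)]
                     else runs ++ [(c, 1)]
      | none => [(c, 1)])
    []
  runs.foldl (fun acc r => acc + PySem.Int.floordiv (r.2 * (r.2 - 1)) 2) 0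

-- ===== PRECONDITION & SPEC =====
-- A raises IndexError exactly when n ≥ 2 and n exceeds len(s); those inputs are excluded.
def Pre_sameCount (n : Int) (s : String) : Prop := n ≤ 1 ∨ n ≤ (s.toList.length : Int)
instance (n : Int) (s : String) : Decidable (Pre_sameCount n s) := by unfold Pre_sameCount; infer_instance
def pvWitness_sameCount : Int × String := (3, "aab")

def Spec_sameCount (n : Int) (s : String) (out : Int) : Prop := out = sameCount_alt n s
instance (n : Int) (s : String) (out : Int) : Decidable (Spec_sameCount n s out) := by unfold Spec_sameCount; infer_instance

-- ===== CLAIM (what is proved, stated in full; the proofs are below) =====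
def Claim_equal_sameCount : Prop := ∀ (n : Int) (s : String), Dom_sameCount n s → Pre_sameCount n s → Spec_sameCount n s (sameCount n s)

-- ===== LEMMAS AND PROOFS =====

-- triangular number of a run of length c, exactly as both ports compute it
def pvTri (c : Int) : Int := PySem.Int.floordiv (c * (c - 1)) 2

-- reference function: pair count of a run-in-progress (prev char p, current length c) followed by l,
-- INCLUDING pvTri c for the current run
def pvH : Char → Int → List Char → Int
  | _, c, [] => pvTri c
  | p, c, x :: xs => if x = p then pvH p (c + 1) xs else pvTri c + pvH x 1 xs

lemma pvTri_succ (c : Int) : pvTri (c + 1) = pvTri c + c := by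
  unfold pvTri
  have h : (c + 1) * (c + 1 - 1) = c * (c - 1) + c * 2 := by ring
  rw [h]
  have : PySem.Int.floordiv (c * (c - 1) + c * 2) 2 = Int.fdiv (c * (c - 1) + c * 2) 2 := rfl
  rw [this, Int.add_mul_fdiv_right _ _ (by norm_num : (2:Int) ≠ 0)]
  rfl

lemma pvTri_one : pvTri 1 = 0 := by decide

-- A's loop step
def pvStepA (s : String) (st : Int × Int) (i : Int) : Int × Int :=
  if PySem.Str.pyGet? s i = PySem.Str.pyGet? s (i - 1) then
    (st.1 + ((st.2 + 1) - 1), st.2 + 1)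
  else
    (st.1, 1)

-- B's run-building step
def pvStepB (runs : List (Char × Int)) (c : Char) : List (Char × Int) :=
  match runs.getLast? with
  | some last => if last.1 = c then runs.dropLast ++ [(last.1, last.2 + 1)]
                 else runs ++ [(c, 1)]
  | none => [(c, 1)]

def pvTriSum (r : List (Char × Int)) : Int :=
  r.foldl (fun acc q => acc + PySem.Int.floordiv (q.2 * (q.2 - 1)) 2) 0

lemma pvTriSum_concat (r : List (Char × Int)) (p : Char) (c : Int) :
    pvTriSum (r ++ [(p, c)]) = pvTriSum r + pvTri c := by
  unfold pvTriSum pvTri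
  rw [List.foldl_append]
  rfl

lemma pvB_loop : ∀ (l : List Char) (r : List (Char × Int)) (p : Char) (c : Int),
    pvTriSum (l.foldl pvStepB (r ++ [(p, c)])) = pvTriSum r + pvH p c l := by
  intro l
  induction l with
  | nil => intro r p c; simp [pvH, pvTriSum_concat]
  | cons x xs ih =>
    intro r p c
    rw [List.foldl_cons]
    have hstep : pvStepB (r ++ [(p, c)]) x =
        if p = x then r ++ [(p, c + 1)] else (r ++ [(p, c)]) ++ [(x, 1)] := by
      unfold pvStepB
      rw [List.getLast?_concat]
      by_cases h : p = x
      · simp [h]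
      · simp [h]
    rw [hstep]
    by_cases h : p = x
    · rw [if_pos h, ih]
      have : pvH p c (x :: xs) = pvH p (c + 1) xs := by
        rw [pvH]; rw [if_pos h.symm]
      rw [this]
    · rw [if_neg h, ih, pvTriSum_concat]
      have : pvH p c (x :: xs) = pvTri c + pvH x 1 xs := by
        rw [pvH]; rw [if_neg (fun hx => h hx.symm)]
      rw [this]
      ring

lemma pvA_loop (s : String) : ∀ (m i : Nat) (sub count : Int) (h1 : 1 ≤ i) (h2 : i + m ≤ s.toList.length),
    ((PySem.List.pyRange i (i + m) 1).foldl (pvStepA s) (sub, count)).1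
      = sub + pvH (s.toList[i - 1]'(by omega)) count ((s.toList.drop i).take m) - pvTri count := by
  intro m
  induction m with
  | zero =>
    intro i sub count h1 h2
    rw [PySem.List.pyRange_one_eq_nil (by push_cast; omega)]
    simp [pvH]
  | succ m ih =>
    intro i sub count h1 h2
    have hi : i < s.toList.length := by omega
    have hi1 : i - 1 < s.toList.length := by omega
    rw [PySem.List.pyRange_one_cons (by push_cast; omega), List.foldl_cons]
    have hg1 : PySem.Str.pyGet? s (i : Int) = some (s.toList[i]'hi) := by
      rw [PySem.Str.pyGet?_natCast, List.getElem?_eq_getElem hi]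
    have hg0 : PySem.Str.pyGet? s ((i : Int) - 1) = some (s.toList[i - 1]'hi1) := by
      have hcast : ((i : Int) - 1) = ((i - 1 : Nat) : Int) := by omega
      rw [hcast, PySem.Str.pyGet?_natCast, List.getElem?_eq_getElem hi1]
    have hstep : pvStepA s (sub, count) (i : Int)
        = if s.toList[i]'hi = s.toList[i - 1]'hi1 then (sub + (count + 1 - 1), count + 1)
          else (sub, 1) := by
      unfold pvStepA
      rw [hg1, hg0]
      by_cases hc : s.toList[i]'hi = s.toList[i - 1]'hi1
      · rw [if_pos hc, if_pos (by rw [hc])]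
      · rw [if_neg hc, if_neg (by simpa using hc)]
    rw [hstep]
    have hdt : (s.toList.drop i).take (m + 1)
        = s.toList[i]'hi :: ((s.toList.drop (i + 1)).take m) := by
      rw [List.drop_eq_getElem_cons hi, List.take_succ_cons]
    have hidx : s.toList[(i + 1) - 1]'(by omega) = s.toList[i]'hi := by
      congr 1
    push_cast
    have e2 : ((i : Int) + ((m : Int) + 1)) = ((i : Int) + 1) + (m : Int) := by ring
    rw [e2, hdt]
    by_cases hc : s.toList[i]'hi = s.toList[i - 1]'hi1
    · rw [if_pos hc]
      have hih := ih (i + 1) (sub + (count + 1 - 1)) (count + 1) (by omega) (by omega)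
      rw [hidx] at hih
      push_cast at hih
      rw [hih, pvH, if_pos hc, pvTri_succ, hc]
      ring
    · rw [if_neg hc]
      have hih := ih (i + 1) sub 1 (by omega) (by omega)
      rw [hidx] at hih
      push_cast at hih
      rw [hih, pvH, if_neg hc, pvTri_one]
      ring

lemma pvSlice_toList (s : String) (n : Int) (h : 0 ≤ n) :
    (PySem.Str.slice s none (some n)).toList = s.toList.take n.toNat := by
  simp [PySem.Str.slice, PySem.List.slice_to _ h]

-- ===== VERDICT (by name: the statement is the Claim_ definition above) =====
theorem sameCount_spec : Claim_equal_sameCount := by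
  intro n s _ hpre
  unfold Spec_sameCount
  have hA : sameCount n s = ((PySem.List.pyRange 1 n 1).foldl (pvStepA s) (0, 1)).1 := rfl
  have hB : sameCount_alt n s
      = pvTriSum (((if n > 0 then PySem.Str.slice s none (some n) else "").toList).foldl pvStepB []) := rfl
  rw [hA, hB]
  by_cases hn : 0 < n
  · -- n ≥ 1
    rw [if_pos hn, pvSlice_toList s n (by omega)]
    match hl : s.toList with
    | [] =>
      -- s is empty: Pre forces n = 1
      have hlen : (s.toList.length : Int) = 0 := by rw [hl]; rfl
      have hn1 : n = 1 := by unfold Pre_sameCount at hpre; omega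
      rw [hn1]
      rw [PySem.List.pyRange_one_eq_nil (by omega)]
      rfl
    | a :: rest =>
      have hN : ((n.toNat : Nat) : Int) = n := Int.toNat_of_nonneg (by omega)
      have htake : (a :: rest).take n.toNat = a :: rest.take (n.toNat - 1) := by
        have h' : n.toNat = (n.toNat - 1) + 1 := by omega
        conv_lhs => rw [h']
        rw [List.take_succ_cons]
      rw [htake]
      have hfold : (a :: rest.take (n.toNat - 1)).foldl pvStepB []
          = (rest.take (n.toNat - 1)).foldl pvStepB ([] ++ [(a, 1)]) := rfl
      rw [hfold, pvB_loop]
      by_cases hn2 : n = 1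
      · rw [hn2, PySem.List.pyRange_one_eq_nil (by omega)]
        simp [pvTriSum, pvH, pvTri_one]
      · -- 2 ≤ n, so Pre gives n ≤ len s
        have hlen : n ≤ (s.toList.length : Int) := by
          unfold Pre_sameCount at hpre; omega
        have hlen' : 1 + (n.toNat - 1) ≤ s.toList.length := by omega
        have hAL := pvA_loop s (n.toNat - 1) 1 0 1 (le_refl 1) hlen'
        have e2 : (((1 : Nat) : Int)) + ((n.toNat - 1 : Nat) : Int) = n := by omega
        have e1 : (((1 : Nat) : Int)) = (1 : Int) := by omega
        rw [e2, e1] at hAL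
        rw [hAL, pvTri_one]
        have hget : s.toList[1 - 1]'(by omega) = a := by
          simp [hl]
        have hdrop : s.toList.drop 1 = rest := by rw [hl]; rfl
        rw [hget, hdrop]
        simp [pvTriSum]
  · -- n ≤ 0: both sides are 0
    rw [if_neg hn, PySem.List.pyRange_one_eq_nil (by omega)]
    rfl
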